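-- pv_equiv track=rewrite | github.com/dagger/dagger | sdk/python/src/dagger/mod/_static_convert.py | _unwrap_wrappers
-- ===== SOURCE A (Python) =====
-- _LIST_PREFIXES = ("list[", "List[", "typing.List[")
--
-- _OPTIONAL_PREFIXES = ("Optional[", "typing.Optional[")
--
-- def _strip_outer(text: str, prefix: str, suffix: str) -> str:
--     return text[len(prefix) : -len(suffix)]
--
-- def _split_union_none(s: str) -> tuple[str, bool]:
--     # Detect patterns like "T | None" or "None | T"
--     parts = [p.strip() for p in s.split("|")]
--     if len(parts) == 2 and (parts[0].lower() == "none" or parts[1].lower() == "none"):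
--         other = parts[1] if parts[0].lower() == "none" else parts[0]
--         return other, True
--     return s, False
--
-- def _unwrap_wrappers(text: str) -> str:
--     # Remove Optional[...] and list[...] wrappers repeatedly, and unwrap X | None
--     changed = True
--     while changed and text:
--         changed = False
--         # Optional[...] forms
--         for pref in _OPTIONAL_PREFIXES:
--             if text.startswith(pref) and text.endswith("]"):
--                 text = _strip_outer(text, pref, "]").strip()
--                 changed = True
--         # X | None union
--         inner, opt = _split_union_none(text)
--         if opt:
--             text = inner.strip()
--             changed = True
--         # list[...] forms
--         for pref in _LIST_PREFIXES:
--             if text.startswith(pref) and text.endswith("]"):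
--                 text = _strip_outer(text, pref, "]").strip()
--                 changed = True
--     return text
-- ===== SOURCE B (Python) =====
-- # Recursive-descent peeling with manual parsing: one wrapper layer is removed per
-- # recursive call (a bracket prefix matched via slice comparison, or a union-with-None
-- # form found with partition and a hand-rolled case-insensitive test for the None
-- # word), instead of A's while/changed fixpoint loop over startswith/split/lower.
--
-- _PREFIXES = ("Optional[", "typing.Optional[", "list[", "List[", "typing.List[")
--
--
-- def _is_none(s: str) -> bool:
--     return (len(s) == 4 and s[0] in "nN" and s[1] in "oO"
--             and s[2] in "nN" and s[3] in "eE")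
--
--
-- def _unwrap_wrappers(text: str) -> str:
--     if not text:
--         return text
--     if text.endswith("]"):
--         for pref in _PREFIXES:
--             if text[:len(pref)] == pref:
--                 return _unwrap_wrappers(text[len(pref):-1].strip())
--     head, bar, tail = text.partition("|")
--     if bar and "|" not in tail:
--         left, right = head.strip(), tail.strip()
--         if _is_none(left):
--             return _unwrap_wrappers(right)
--         if _is_none(right):
--             return _unwrap_wrappers(left)
--     return text
-- ===== Notes on version B (the rewrite author's own statement) =====
-- stated objective: alternative
-- what changed: Replaces A's while/changed fixpoint loop over startswith/split/lower with recursive one-layer peeling that parses manually: prefixes matched by slice comparison, the union-with-None form found via partition with a uniqueness check on the separator, and a hand-rolled case-insensitive test for the None word.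
import Mathlib
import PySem

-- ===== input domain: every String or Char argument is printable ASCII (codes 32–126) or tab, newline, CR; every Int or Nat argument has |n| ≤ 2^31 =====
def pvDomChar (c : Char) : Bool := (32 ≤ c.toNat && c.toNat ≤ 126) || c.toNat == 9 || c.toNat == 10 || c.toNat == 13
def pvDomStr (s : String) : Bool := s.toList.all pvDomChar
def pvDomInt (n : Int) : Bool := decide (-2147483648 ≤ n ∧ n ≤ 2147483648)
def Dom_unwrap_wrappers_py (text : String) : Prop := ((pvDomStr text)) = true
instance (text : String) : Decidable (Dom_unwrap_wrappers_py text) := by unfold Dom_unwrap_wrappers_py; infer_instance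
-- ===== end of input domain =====

-- B replaces A's while/changed fixpoint loop (startswith/split/lower) by recursive
-- one-layer peeling that parses manually (slice-compared prefixes, partition-based
-- union split, hand-rolled case-insensitive "none" test); same return value.

-- ===== PORT A =====
-- A-side constants (the module tuples)
def pvOptionalPrefixes : List (List Char) := ["Optional[".toList, "typing.Optional[".toList]
def pvListPrefixes : List (List Char) := ["list[".toList, "List[".toList, "typing.List[".toList]

-- _strip_outer: text[len(prefix) : -len(suffix)]
def pvStripOuter (t p suf : List Char) : List Char :=
  PySem.List.slice t (some ((p.length : Int))) (some (-(suf.length : Int)))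

-- _split_union_none
def pvSplitUnionNone (s : List Char) : List Char × Bool :=
  let parts := (PySem.Chars.splitOn s "|".toList).map PySem.Chars.strip
  if parts.length = 2 ∧ (PySem.Chars.lower (parts.getD 0 []) = "none".toList ∨
      PySem.Chars.lower (parts.getD 1 []) = "none".toList) then
    let other := if PySem.Chars.lower (parts.getD 0 []) = "none".toList
      then parts.getD 1 [] else parts.getD 0 []
    (other, true)
  else (s, false)

-- body of one `for pref in …` iteration of A (state = (text, changed))
def pvPassStep (st : List Char × Bool) (p : List Char) : List Char × Bool :=
  if PySem.Chars.startswith st.1 p && PySem.Chars.endswith st.1 "]".toList then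
    (PySem.Chars.strip (pvStripOuter st.1 p "]".toList), true)
  else st

-- one iteration of A's while-loop body
def pvAIter (t : List Char) : List Char × Bool :=
  let s1 := pvOptionalPrefixes.foldl pvPassStep (t, false)
  let u := pvSplitUnionNone s1.1
  let s2 := if u.2 then (PySem.Chars.strip u.1, true) else s1
  pvListPrefixes.foldl pvPassStep s2

-- ---- termination lemmas (cited by the ports' decreasing_by) ----

-- reference single-character split, used to characterise PySem.Chars.splitOn s "|"
def pvSplitC (c : Char) : List Char → List (List Char)
  | [] => [[]]
  | x :: xs => if x = c then [] :: pvSplitC c xs else (pvSplitC c xs).modifyHead (x :: ·)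

lemma pvSplitC_ne_nil (c : Char) (l : List Char) : pvSplitC c l ≠ [] := by
  induction l with
  | nil => simp [pvSplitC]
  | cons x xs ih =>
    simp only [pvSplitC]
    split
    · simp
    · cases h : pvSplitC c xs with
      | nil => exact absurd h ih
      | cons a as => simp [h]

lemma pvGoSucc (c : Char) (fuel : Nat) (x : Char) (rest cur : List Char) (acc : List (List Char)) :
    PySem.Chars.splitOn.go [c] (fuel+1) (x :: rest) cur acc
      = if x = c then PySem.Chars.splitOn.go [c] fuel rest [] (cur.reverse :: acc)
        else PySem.Chars.splitOn.go [c] fuel rest (x :: cur) acc := by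
  rw [PySem.Chars.splitOn.go]
  by_cases h : x = c
  · simp [List.isPrefixOf, h]
  · simp [List.isPrefixOf, h]
    exact fun hh => absurd hh.symm h

lemma pvGoNil (c : Char) (fuel : Nat) (cur : List Char) (acc : List (List Char)) :
    PySem.Chars.splitOn.go [c] (fuel+1) [] cur acc = (cur.reverse :: acc).reverse := by
  rw [PySem.Chars.splitOn.go]
  simp

lemma pvSplitOnGo_eq (c : Char) (fuel : Nat) (l cur : List Char) (acc : List (List Char))
    (h : l.length < fuel) :
    PySem.Chars.splitOn.go [c] fuel l cur acc
      = acc.reverse ++ (pvSplitC c l).modifyHead (cur.reverse ++ ·) := by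
  induction fuel generalizing l cur acc with
  | zero => omega
  | succ fuel ih =>
    cases l with
    | nil => rw [pvGoNil]; simp [pvSplitC]
    | cons x rest =>
      simp only [List.length_cons] at h
      rw [pvGoSucc]
      by_cases hx : x = c
      · rw [if_pos hx, ih rest [] (cur.reverse :: acc) (by omega)]
        subst hx
        cases hs : pvSplitC x rest with
        | nil => exact absurd hs (pvSplitC_ne_nil x rest)
        | cons a as => simp [pvSplitC, hs]
      · rw [if_neg hx, ih rest (x :: cur) acc (by omega)]
        cases hs : pvSplitC c rest with
        | nil => exact absurd hs (pvSplitC_ne_nil c rest)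
        | cons a as => simp [pvSplitC, hx, hs]

lemma pvSplitOn_single (c : Char) (l : List Char) :
    PySem.Chars.splitOn l [c] = pvSplitC c l := by
  unfold PySem.Chars.splitOn
  rw [pvSplitOnGo_eq c (l.length + 1) l [] [] (by omega)]
  cases hs : pvSplitC c l with
  | nil => exact absurd hs (pvSplitC_ne_nil c l)
  | cons a as => simp

lemma pvSplitC_single (c : Char) (t b : List Char) (h : pvSplitC c t = [b]) : t = b := by
  induction t generalizing b with
  | nil => simpa [pvSplitC] using h.symm
  | cons x xs ih =>
    simp only [pvSplitC] at h
    split at h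
    · cases hs : pvSplitC c xs with
      | nil => exact absurd hs (pvSplitC_ne_nil c xs)
      | cons a as => rw [hs] at h; simp at h
    · cases hs : pvSplitC c xs with
      | nil => exact absurd hs (pvSplitC_ne_nil c xs)
      | cons a as =>
        rw [hs] at h
        simp only [List.modifyHead] at h
        obtain ⟨h1, h2⟩ := List.cons_eq_cons.mp h
        subst h2
        rw [← h1, ih a hs]

lemma pvSplitC_pair (c : Char) (t a b : List Char) (h : pvSplitC c t = [a, b]) :
    t = a ++ c :: b := by
  induction t generalizing a b with
  | nil => simp [pvSplitC] at h
  | cons x xs ih =>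
    simp only [pvSplitC] at h
    split at h
    · rename_i hx
      obtain ⟨h1, h2⟩ := List.cons_eq_cons.mp h
      subst hx
      subst h1
      simp [pvSplitC_single x xs b h2]
    · cases hs : pvSplitC c xs with
      | nil => exact absurd hs (pvSplitC_ne_nil c xs)
      | cons a' as =>
        rw [hs] at h
        simp only [List.modifyHead] at h
        obtain ⟨h1, h2⟩ := List.cons_eq_cons.mp h
        subst h1
        have := ih a' b (hs.trans (by rw [h2]))
        simp [this]

lemma pvLenStrip_le (s : List Char) : (PySem.Chars.strip s).length ≤ s.length := by
  simp only [PySem.Chars.strip, PySem.Chars.rstrip, PySem.Chars.lstrip, List.length_reverse]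
  calc (List.dropWhile PySem.Chars.isspace
          (List.dropWhile PySem.Chars.isspace s).reverse).length
      ≤ (List.dropWhile PySem.Chars.isspace s).reverse.length :=
        List.length_dropWhile_le _ _
    _ ≤ s.length := by
        rw [List.length_reverse]; exact List.length_dropWhile_le _ _

lemma pvBracketDec (t p : List Char) (_hp : p ≠ []) :
    (PySem.Chars.strip (PySem.List.slice t (some ((p.length : Int))) (some (-1)))).length
      < t.length ∨ t = [] := by
  by_cases ht : t = []
  · exact Or.inr ht
  · left
    have h1 := pvLenStrip_le (PySem.List.slice t (some ((p.length : Int))) (some (-1)))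
    rw [PySem.List.length_slice, PySem.List.clampIdx_neg_one, PySem.List.clampIdx_natCast] at h1
    have h2 : 0 < t.length := List.length_pos_iff.mpr ht
    omega

lemma pvStripOuter_eq (t p : List Char) :
    pvStripOuter t p "]".toList
      = PySem.List.slice t (some ((p.length : Int))) (some (-1)) := by
  have h : (-(("]".toList.length : Nat) : Int)) = -1 := by decide
  rw [pvStripOuter, h]

lemma pvUnionPartsDec (t : List Char)
    (h : ((PySem.Chars.splitOn t "|".toList).map PySem.Chars.strip).length = 2) :
    (((PySem.Chars.splitOn t "|".toList).map PySem.Chars.strip).getD 0 []).length < t.length ∧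
    (((PySem.Chars.splitOn t "|".toList).map PySem.Chars.strip).getD 1 []).length < t.length := by
  have hbar : ("|".toList : List Char) = ['|'] := rfl
  rw [hbar, pvSplitOn_single] at h ⊢
  rw [List.length_map] at h
  obtain ⟨a, b, hab⟩ := List.length_eq_two.mp h
  have ht := pvSplitC_pair '|' t a b hab
  have ha := pvLenStrip_le a
  have hb := pvLenStrip_le b
  subst ht
  rw [hab]
  simp only [List.map_cons, List.map_nil, List.getD_cons_zero, List.getD_cons_succ]
  constructor <;> simp [List.length_append] <;> omega

-- progress/identity dichotomy for A's iteration, for pvALoop's termination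
def pvQ (st r : List Char × Bool) : Prop :=
  (r.1.length < st.1.length ∧ r.2 = true) ∨ r = st

lemma pvQ_trans {a b c : List Char × Bool} (h1 : pvQ a b) (h2 : pvQ b c) : pvQ a c := by
  rcases h1 with h1 | h1 <;> rcases h2 with h2 | h2
  · exact Or.inl ⟨lt_trans h2.1 h1.1, h2.2⟩
  · subst h2; exact Or.inl h1
  · subst h1; exact Or.inl h2
  · subst h1; exact Or.inr h2
lemma pvStep_Q (st : List Char × Bool) (p : List Char) (hp : p ≠ []) :
    pvQ st (pvPassStep st p) := by
  unfold pvPassStep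
  split
  · rename_i hc
    rw [Bool.and_eq_true] at hc
    left
    refine ⟨?_, rfl⟩
    rw [pvStripOuter_eq]
    rcases pvBracketDec st.1 p hp with h | h
    · exact h
    · rw [PySem.Chars.startswith_iff, h, List.prefix_nil] at hc
      exact absurd hc.1 hp
  · exact Or.inr rfl

lemma pvFold_Q (l : List (List Char)) (hl : ∀ p ∈ l, p ≠ []) (st : List Char × Bool) :
    pvQ st (l.foldl pvPassStep st) := by
  induction l generalizing st with
  | nil => exact Or.inr rfl
  | cons p l ih =>
    rw [List.foldl_cons]
    exact pvQ_trans (pvStep_Q st p (hl p (by simp)))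
      (ih (fun q hq => hl q (by simp [hq])) _)

lemma pvUnionNone_true (s : List Char) (h : (pvSplitUnionNone s).2 = true) :
    (PySem.Chars.strip (pvSplitUnionNone s).1).length < s.length := by
  simp only [pvSplitUnionNone] at h ⊢
  split at h
  · rename_i hc
    have hd := pvUnionPartsDec s hc.1
    rw [if_pos hc]
    dsimp only
    split
    · exact lt_of_le_of_lt (pvLenStrip_le _) hd.2
    · exact lt_of_le_of_lt (pvLenStrip_le _) hd.1
  · simp at h

lemma pvAIter_Q (t : List Char) : pvQ (t, false) (pvAIter t) := by
  have h1 := pvFold_Q pvOptionalPrefixes (by decide) (t, false)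
  have h3 : pvQ (pvOptionalPrefixes.foldl pvPassStep (t, false))
      (if (pvSplitUnionNone (pvOptionalPrefixes.foldl pvPassStep (t, false)).1).2 then
        (PySem.Chars.strip (pvSplitUnionNone (pvOptionalPrefixes.foldl pvPassStep (t, false)).1).1, true)
       else pvOptionalPrefixes.foldl pvPassStep (t, false)) := by
    split
    · rename_i hu
      exact Or.inl ⟨pvUnionNone_true _ hu, rfl⟩
    · exact Or.inr rfl
  have h4 := pvFold_Q pvListPrefixes (by decide)
      (if (pvSplitUnionNone (pvOptionalPrefixes.foldl pvPassStep (t, false)).1).2 then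
        (PySem.Chars.strip (pvSplitUnionNone (pvOptionalPrefixes.foldl pvPassStep (t, false)).1).1, true)
       else pvOptionalPrefixes.foldl pvPassStep (t, false))
  exact pvQ_trans h1 (pvQ_trans h3 h4)

lemma pvAIter_dec (t : List Char) (h : (pvAIter t).2 = true) :
    (pvAIter t).1.length < t.length := by
  rcases pvAIter_Q t with h1 | h1
  · exact h1.1
  · rw [h1] at h; cases h

-- _unwrap_wrappers (A): the while changed loop
def pvALoop (t : List Char) : List Char :=
  if t = [] then t
  else
    if h : (pvAIter t).2 = true then pvALoop (pvAIter t).1 else (pvAIter t).1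
termination_by t.length
decreasing_by exact pvAIter_dec t h

def unwrap_wrappers_py (text : String) : String :=
  String.ofList (pvALoop text.toList)

-- ===== PORT B =====
-- the single prefix tuple of Source B
def pvWrapperPrefixes : List (List Char) :=
  ["Optional[".toList, "typing.Optional[".toList, "list[".toList, "List[".toList,
   "typing.List[".toList]

-- _is_none: len(s) == 4 and per-character membership in "nN"/"oO"/"eE",
-- transcribed as a 4-element pattern match
def pvIsNone (s : List Char) : Bool :=
  match s with
  | [c0, c1, c2, c3] =>
      (c0 == 'n' || c0 == 'N') && (c1 == 'o' || c1 == 'O') &&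
      (c2 == 'n' || c2 == 'N') && (c3 == 'e' || c3 == 'E')
  | _ => false

-- text.partition("|") ported by hand (no PySem primitive): the pieces around the
-- FIRST '|' (none = '|' absent, where Python returns (text, '', '')) — exact for
-- the 1-character separator used here
def pvPartitionBar : List Char → Option (List Char × List Char)
  | [] => none
  | c :: cs =>
      if c = '|' then some ([], cs)
      else
        match pvPartitionBar cs with
        | some (l, r) => some (c :: l, r)
        | none => none

lemma pvPartitionBar_some (t a b : List Char) (h : pvPartitionBar t = some (a, b)) :
    t = a ++ '|' :: b ∧ '|' ∉ a := by
  induction t generalizing a b with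
  | nil => cases h
  | cons c cs ih =>
    simp only [pvPartitionBar] at h
    split at h
    · rename_i hc
      simp only [Option.some.injEq, Prod.mk.injEq] at h
      obtain ⟨h1, h2⟩ := h
      subst h1; subst h2; subst hc
      exact ⟨rfl, by simp⟩
    · rename_i hc
      cases hm : pvPartitionBar cs with
      | none => rw [hm] at h; cases h
      | some pr =>
        obtain ⟨l, r⟩ := pr
        rw [hm] at h
        simp only [Option.some.injEq, Prod.mk.injEq] at h
        obtain ⟨h1, h2⟩ := h
        subst h1; subst h2
        obtain ⟨he, hn⟩ := ih l r hm
        subst he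
        refine ⟨rfl, ?_⟩
        intro hmem
        rcases List.mem_cons.mp hmem with h' | h'
        · exact hc h'.symm
        · exact hn h'

-- recursive-descent peeling (Source B): empty → done; bracket prefix → peel+strip and
-- recurse; unique '|' with a stripped "none" side → recurse on the other side
def pvBCore (t : List Char) : List Char :=
  if ht : t = [] then t
  else
    match hf : (if PySem.Chars.endswith t "]".toList then
        pvWrapperPrefixes.find? (fun p => List.take p.length t == p) else none) with
    | some p =>
        -- text[len(pref):-1].strip(); the slice is drop/dropLast (exact: 0 ≤ len(pref))
        pvBCore (PySem.Chars.strip ((t.drop p.length).dropLast))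
    | none =>
      match hb : pvPartitionBar t with
      | some (head, tail) =>
          if PySem.Chars.isIn "|".toList tail then t
          else
            let left := PySem.Chars.strip head
            let right := PySem.Chars.strip tail
            if pvIsNone left then pvBCore right
            else if pvIsNone right then pvBCore left
            else t
      | none => t
termination_by t.length
decreasing_by
  · have h1 := pvLenStrip_le ((t.drop p.length).dropLast)
    have h2 : 0 < t.length := List.length_pos_iff.mpr ht
    simp only [List.length_dropLast, List.length_drop] at h1
    omega
  · obtain ⟨heq, -⟩ := pvPartitionBar_some t head tail hb
    have h1 := pvLenStrip_le tail
    subst heq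
    simp only [List.length_append, List.length_cons]
    omega
  · obtain ⟨heq, -⟩ := pvPartitionBar_some t head tail hb
    have h1 := pvLenStrip_le head
    subst heq
    simp only [List.length_append, List.length_cons]
    omega

def unwrap_wrappers_py_alt (text : String) : String :=
  String.ofList (pvBCore text.toList)

-- ===== PRECONDITION & SPEC =====
def Spec_unwrap_wrappers_py (text : String) (out : String) : Prop := out = unwrap_wrappers_py_alt text
instance (text : String) (out : String) : Decidable (Spec_unwrap_wrappers_py text out) := by unfold Spec_unwrap_wrappers_py; infer_instance

-- ===== CLAIM (what is proved, stated in full; the proofs are below) =====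
def Claim_equal_unwrap_wrappers_py : Prop := ∀ (text : String), Dom_unwrap_wrappers_py text → Spec_unwrap_wrappers_py text (unwrap_wrappers_py text)

-- ===== LEMMAS AND PROOFS =====

lemma pvBCore_nil : pvBCore [] = [] := by
  rw [pvBCore]
  simp

-- Source B's slice comparison of the prefix decides the same test as A's startswith
lemma pvTake_eq_startswith (t p : List Char) :
    (List.take p.length t == p) = PySem.Chars.startswith t p := by
  by_cases hp : p <+: t
  · have h1 : List.take p.length t = p := (List.prefix_iff_eq_take.mp hp).symm
    have h2 := (PySem.Chars.startswith_iff t p).mpr hp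
    rw [h2, h1, beq_self_eq_true]
  · have h2 : PySem.Chars.startswith t p = false := by
      cases h : PySem.Chars.startswith t p
      · rfl
      · exact absurd ((PySem.Chars.startswith_iff t p).mp h) hp
    rw [h2, beq_eq_false_iff_ne]
    intro he
    exact hp (he ▸ List.take_prefix p.length t)

lemma pvFindPred_eq (t : List Char) :
    pvWrapperPrefixes.find? (fun p => List.take p.length t == p)
      = pvWrapperPrefixes.find? (fun p => PySem.Chars.startswith t p) := by
  have h : (fun p : List Char => List.take p.length t == p)
      = (fun p => PySem.Chars.startswith t p) := funext (fun p => pvTake_eq_startswith t p)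
  rw [h]

lemma pvNotBoth {t p q : List Char} (h1 : PySem.Chars.startswith t p = true)
    (h2 : PySem.Chars.startswith t q = true) : p <+: q ∨ q <+: p :=
  List.prefix_or_prefix_of_prefix ((PySem.Chars.startswith_iff t p).mp h1)
    ((PySem.Chars.startswith_iff t q).mp h2)

lemma pvSW_false (t p q : List Char) (hs : PySem.Chars.startswith t p = true)
    (hno : ¬(p <+: q ∨ q <+: p)) : PySem.Chars.startswith t q = false := by
  cases h' : PySem.Chars.startswith t q
  · rfl
  · exact absurd (pvNotBoth hs h') hno

lemma pvFind?_eq (t p : List Char) (hp : p ∈ pvWrapperPrefixes)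
    (hs : PySem.Chars.startswith t p = true) :
    pvWrapperPrefixes.find? (fun q => PySem.Chars.startswith t q) = some p := by
  fin_cases hp
  · simp only [pvWrapperPrefixes, List.find?, hs]
  · simp only [pvWrapperPrefixes, List.find?, hs,
      pvSW_false t _ "Optional[".toList hs (by decide)]
  · simp only [pvWrapperPrefixes, List.find?, hs,
      pvSW_false t _ "Optional[".toList hs (by decide),
      pvSW_false t _ "typing.Optional[".toList hs (by decide)]
  · simp only [pvWrapperPrefixes, List.find?, hs,
      pvSW_false t _ "Optional[".toList hs (by decide),
      pvSW_false t _ "typing.Optional[".toList hs (by decide),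
      pvSW_false t _ "list[".toList hs (by decide)]
  · simp only [pvWrapperPrefixes, List.find?, hs,
      pvSW_false t _ "Optional[".toList hs (by decide),
      pvSW_false t _ "typing.Optional[".toList hs (by decide),
      pvSW_false t _ "list[".toList hs (by decide),
      pvSW_false t _ "List[".toList hs (by decide)]

lemma pvDropWhile_prefix_fix {p : Char → Bool} {u v : List Char} (hpre : v <+: u)
    (hu : List.dropWhile p u = u) : List.dropWhile p v = v := by
  cases v with
  | nil => rfl
  | cons a w =>
    obtain ⟨r, hr⟩ := hpre
    have ha : p a = false := by
      by_contra hpa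
      have hpa' : p a = true := by revert hpa; cases p a <;> simp
      rw [← hr, List.cons_append] at hu
      rw [List.dropWhile_cons, hpa', if_pos rfl] at hu
      have := congrArg List.length hu
      have hle := List.length_dropWhile_le p (w ++ r)
      simp [List.length_append] at this hle
      omega
    rw [List.dropWhile_cons, ha]
    simp only [Bool.false_eq_true, if_false]

lemma pvDropWhile_idem (p : Char → Bool) (l : List Char) :
    List.dropWhile p (List.dropWhile p l) = List.dropWhile p l := by
  cases h : List.dropWhile p l with
  | nil => rfl
  | cons a w =>
    have hne : List.dropWhile p l ≠ [] := by rw [h]; simp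
    have ha := List.head_dropWhile_not p hne
    have ha' : p a = false := by
      have : (List.dropWhile p l).head hne = a := by
        simp only [h, List.head_cons]
      rw [this] at ha
      revert ha; cases p a <;> simp
    rw [List.dropWhile_cons, ha']
    simp only [Bool.false_eq_true, if_false]

lemma pvRstrip_prefix (s : List Char) : PySem.Chars.rstrip s <+: s := by
  simp only [PySem.Chars.rstrip]
  have := List.dropWhile_suffix (l := s.reverse) (p := PySem.Chars.isspace)
  obtain ⟨r, hr⟩ := this
  exact ⟨r.reverse, by rw [← List.reverse_append, hr, List.reverse_reverse]⟩

lemma pvStrip_idem (s : List Char) :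
    PySem.Chars.strip (PySem.Chars.strip s) = PySem.Chars.strip s := by
  simp only [PySem.Chars.strip]
  have h1 : PySem.Chars.lstrip (PySem.Chars.rstrip (PySem.Chars.lstrip s))
      = PySem.Chars.rstrip (PySem.Chars.lstrip s) := by
    simp only [PySem.Chars.lstrip]
    exact pvDropWhile_prefix_fix (pvRstrip_prefix _) (pvDropWhile_idem _ _)
  rw [h1]
  simp only [PySem.Chars.rstrip, List.reverse_reverse]
  rw [pvDropWhile_idem]

lemma pvDropWhile_append_last {p : Char → Bool} {c : Char} (hc : p c = false)
    (xs : List Char) : ∃ u, List.dropWhile p (xs ++ [c]) = u ++ [c] := by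
  induction xs with
  | nil => exact ⟨[], by simp [List.dropWhile_cons, hc]⟩
  | cons a ys ih =>
    rw [List.cons_append]
    rw [List.dropWhile_cons]
    cases hpa : p a
    · exact ⟨a :: ys, by simp⟩
    · simpa using ih

lemma pvStrip_head {c : Char} (hc : PySem.Chars.isspace c = false) (xs : List Char) :
    ∃ u, PySem.Chars.strip (c :: xs) = c :: u := by
  simp only [PySem.Chars.strip, PySem.Chars.lstrip, List.dropWhile_cons, hc,
    Bool.false_eq_true, if_false, PySem.Chars.rstrip, List.reverse_cons]
  obtain ⟨u, hu⟩ := pvDropWhile_append_last hc xs.reverse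
  rw [hu]
  exact ⟨u.reverse, by simp⟩

lemma pvStrip_last {c : Char} (hc : PySem.Chars.isspace c = false) (xs : List Char) :
    ∃ u, PySem.Chars.strip (xs ++ [c]) = u ++ [c] := by
  simp only [PySem.Chars.strip, PySem.Chars.lstrip]
  obtain ⟨u, hu⟩ := pvDropWhile_append_last hc xs
  rw [hu]
  simp only [PySem.Chars.rstrip, List.reverse_append, List.reverse_cons]
  simp only [List.reverse_nil, List.nil_append, List.singleton_append, List.dropWhile_cons, hc,
    Bool.false_eq_true, if_false]
  exact ⟨u, by simp⟩

lemma pvLower_ne_none_of_last {s : List Char} (h : s.getLast? = some ']') :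
    PySem.Chars.lower s ≠ "none".toList := by
  intro hlow
  have h1 : (PySem.Chars.lower s).getLast? = some 'e' := by rw [hlow]; decide
  obtain ⟨l', rfl⟩ := List.getLast?_eq_some_iff.mp h
  rw [PySem.Chars.lower, List.map_append] at h1
  simp at h1
  exact absurd h1 (by decide)

lemma pvNoUnion (t p : List Char) (hpne : p ≠ []) (hbar : '|' ∉ p)
    (hhead : PySem.Chars.isspace (p.headD ' ') = false)
    (hlow : PySem.Chars.lowerChar (p.headD ' ') ≠ 'n')
    (hs : PySem.Chars.startswith t p = true)
    (he : PySem.Chars.endswith t "]".toList = true) :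
    pvSplitUnionNone t = (t, false) := by
  simp only [pvSplitUnionNone]
  split
  · exfalso
    rename_i hcond
    have hbar' : ("|".toList : List Char) = ['|'] := rfl
    rw [hbar', pvSplitOn_single] at hcond
    obtain ⟨hlen, hor⟩ := hcond
    rw [List.length_map] at hlen
    obtain ⟨a, b, hab⟩ := List.length_eq_two.mp hlen
    have ht : t = a ++ '|' :: b := pvSplitC_pair '|' t a b hab
    rw [hab] at hor
    simp only [List.map_cons, List.map_nil, List.getD_cons_zero, List.getD_cons_succ] at hor
    have hj : ("]".toList : List Char) = [']'] := rfl
    have hlast : b.getLast? = some ']' := by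
      rw [PySem.Chars.endswith_iff, hj] at he
      obtain ⟨w, hw⟩ := he
      rw [ht] at hw
      obtain ⟨x, hx⟩ : ∃ x, b.getLast? = some x := by
        cases hbq : b.getLast? with
        | none =>
          rw [List.getLast?_eq_none_iff] at hbq
          subst hbq
          have hthis := congrArg List.getLast? hw
          have h2 : a ++ ('|' :: ([] : List Char)) = a ++ ['|'] := rfl
          rw [h2, List.getLast?_concat, List.getLast?_concat] at hthis
          exact absurd hthis (by decide)
        | some x => exact ⟨x, rfl⟩
      obtain ⟨b', rfl⟩ := List.getLast?_eq_some_iff.mp hx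
      have h2 : a ++ '|' :: (b' ++ [x]) = (a ++ '|' :: b') ++ [x] := by simp
      rw [h2] at hw
      have hthis := congrArg List.getLast? hw
      rw [List.getLast?_concat, List.getLast?_concat] at hthis
      have hx' : x = ']' := by injection hthis with hh; exact hh.symm
      subst hx'
      exact hx
    have hpa : p <+: a := by
      have hat : a <+: t := ht ▸ ⟨'|' :: b, rfl⟩
      rcases List.prefix_or_prefix_of_prefix ((PySem.Chars.startswith_iff t p).mp hs) hat with
        h | h
      · exact h
      · obtain ⟨p', hp'⟩ := h
        cases p' with
        | nil => simp at hp'; exact hp' ▸ List.prefix_refl a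
        | cons c rest =>
          exfalso
          have hpt := (PySem.Chars.startswith_iff t p).mp hs
          rw [ht, ← hp'] at hpt
          have : (c :: rest : List Char) <+: '|' :: b := by
            rwa [List.prefix_append_right_inj] at hpt
          have hc : c = '|' := (List.cons_prefix_cons.mp this).1
          exact hbar (by rw [← hp', hc]; simp)
    obtain ⟨c, u, rfl⟩ : ∃ c u, p = c :: u := by
      cases p with
      | nil => exact absurd rfl hpne
      | cons c u => exact ⟨c, u, rfl⟩
    have hcs : PySem.Chars.isspace c = false := hhead
    have hcn : PySem.Chars.lowerChar c ≠ 'n' := hlow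
    obtain ⟨a', rfl⟩ : ∃ a', a = c :: a' := by
      cases a with
      | nil => rw [List.prefix_nil] at hpa; cases hpa
      | cons d a' =>
        have := (List.cons_prefix_cons.mp hpa).1
        exact ⟨a', by rw [this]⟩
    rcases hor with h0 | h1
    · obtain ⟨w, hw⟩ := pvStrip_head hcs a'
      rw [hw] at h0
      have : PySem.Chars.lowerChar c = 'n' := by
        have := congrArg List.head? h0
        simpa [PySem.Chars.lower] using this
      exact hcn this
    · obtain ⟨b', hb'⟩ := List.getLast?_eq_some_iff.mp hlast
      obtain ⟨w, hw⟩ := pvStrip_last (c := ']') (by decide) b'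
      rw [hb'] at h1
      rw [hw] at h1
      exact pvLower_ne_none_of_last (by simp) h1
  · rfl

lemma pvPrefixFacts : ∀ p ∈ pvWrapperPrefixes, p ≠ [] ∧ '|' ∉ p ∧
    PySem.Chars.isspace (p.headD ' ') = false ∧ PySem.Chars.lowerChar (p.headD ' ') ≠ 'n' := by
  decide

-- B's text[len(pref):-1] (drop/dropLast) is A's slice
lemma pvSliceDrop (t : List Char) (n : Nat) :
    PySem.List.slice t (some ((n : Int))) (some (-1)) = (t.drop n).dropLast := by
  simp only [PySem.List.slice, PySem.List.clampIdx_neg_one, PySem.List.clampIdx_natCast]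
  by_cases h : n ≤ t.length
  · rw [min_eq_left h, List.dropLast_eq_take, List.length_drop]
    congr 1
    omega
  · have h' : t.length ≤ n := by omega
    rw [min_eq_right h', List.drop_eq_nil_of_le (le_refl _),
        List.drop_eq_nil_of_le h']
    simp

lemma pvPartitionBar_none (t : List Char) (h : pvPartitionBar t = none) : '|' ∉ t := by
  induction t with
  | nil => simp
  | cons c cs ih =>
    simp only [pvPartitionBar] at h
    split at h
    · cases h
    · rename_i hc
      cases hm : pvPartitionBar cs with
      | none =>
        intro hmem
        rcases List.mem_cons.mp hmem with h' | h'
        · exact hc h'.symm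
        · exact ih hm h'
      | some pr =>
        rw [hm] at h
        rcases pr with ⟨x, y⟩
        cases h

lemma pvSplitC_noBar (b : List Char) (h : '|' ∉ b) : pvSplitC '|' b = [b] := by
  induction b with
  | nil => rfl
  | cons x xs ih =>
    have hx : x ≠ '|' := fun hh => h (by simp [hh])
    have hxs : '|' ∉ xs := fun hh => h (by simp [hh])
    simp [pvSplitC, if_neg hx, ih hxs]

lemma pvSplitC_app (a b : List Char) (h : '|' ∉ a) :
    pvSplitC '|' (a ++ '|' :: b) = a :: pvSplitC '|' b := by
  induction a with
  | nil => simp [pvSplitC]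
  | cons x xs ih =>
    have hx : x ≠ '|' := fun hh => h (by simp [hh])
    have hxs : '|' ∉ xs := fun hh => h (by simp [hh])
    simp only [List.cons_append, pvSplitC, if_neg hx, ih hxs, List.modifyHead]

lemma pvSplitC_two_le (b : List Char) (h : '|' ∈ b) : 2 ≤ (pvSplitC '|' b).length := by
  induction b with
  | nil => cases h
  | cons x xs ih =>
    by_cases hx : x = '|'
    · have hne := pvSplitC_ne_nil '|' xs
      cases hs : pvSplitC '|' xs with
      | nil => exact absurd hs hne
      | cons a as => simp [pvSplitC, hx, hs]
    · have hxs : '|' ∈ xs := by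
        rcases List.mem_cons.mp h with h' | h'
        · exact absurd h'.symm hx
        · exact h'
      have := ih hxs
      simpa [pvSplitC, hx, List.length_modifyHead] using this

-- B's "|" not in tail is the absence of '|'
lemma pvIsIn_bar (l : List Char) : PySem.Chars.isIn "|".toList l = true ↔ '|' ∈ l := by
  rw [PySem.Chars.isIn_iff_infix]
  constructor
  · rintro ⟨s, t, rfl⟩
    simp
  · intro hm
    obtain ⟨s, t, rfl⟩ := List.append_of_mem hm
    exact ⟨s, t, by simp⟩

lemma pvUpperIff (c : Char) : PySem.Chars.isupper c = true ↔ (65 ≤ c.toNat ∧ c.toNat ≤ 90) := by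
  unfold PySem.Chars.isupper
  rw [Bool.and_eq_true, decide_eq_true_iff, decide_eq_true_iff]
  exact ⟨fun h => ⟨h.1, h.2⟩, fun h => ⟨h.1, h.2⟩⟩

lemma pvLowerChar_eq (c u l : Char) (h65 : 65 ≤ u.toNat) (h90 : u.toNat ≤ 90)
    (hl : u.toNat + 32 = l.toNat) :
    (PySem.Chars.lowerChar c = l) ↔ (c = l ∨ c = u) := by
  constructor
  · intro h
    unfold PySem.Chars.lowerChar at h
    split at h
    · rename_i hup
      right
      have hb := (pvUpperIff c).mp hup
      have hofn : (Char.ofNat (c.toNat + 32)).toNat = c.toNat + 32 := by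
        rw [Char.ofNat, dif_pos (Or.inl (by omega))]; exact Char.toNat_ofNatAux _
      have hcu : c.toNat = u.toNat := by
        have h2 := congrArg Char.toNat h
        rw [hofn] at h2; omega
      calc c = Char.ofNat c.toNat := (Char.ofNat_toNat c).symm
        _ = Char.ofNat u.toNat := by rw [hcu]
        _ = u := Char.ofNat_toNat u
    · exact Or.inl h
  · rintro (rfl | rfl)
    · unfold PySem.Chars.lowerChar
      rw [if_neg]
      intro hup
      have := (pvUpperIff c).mp hup
      omega
    · unfold PySem.Chars.lowerChar
      rw [if_pos ((pvUpperIff c).mpr ⟨h65, h90⟩), hl, Char.ofNat_toNat]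

-- B's hand-rolled _is_none is A's .lower() == "none"
set_option maxRecDepth 4096 in
lemma pvIsNone_iff (s : List Char) :
    pvIsNone s = true ↔ PySem.Chars.lower s = "none".toList := by
  have hn := fun c => pvLowerChar_eq c 'N' 'n' (by decide) (by decide) (by decide)
  have ho := fun c => pvLowerChar_eq c 'O' 'o' (by decide) (by decide) (by decide)
  have he := fun c => pvLowerChar_eq c 'E' 'e' (by decide) (by decide) (by decide)
  match s with
  | [] => simp [pvIsNone, PySem.Chars.lower]
  | [c0] => simp [pvIsNone, PySem.Chars.lower]
  | [c0, c1] => simp [pvIsNone, PySem.Chars.lower]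
  | [c0, c1, c2] => simp [pvIsNone, PySem.Chars.lower]
  | c0 :: c1 :: c2 :: c3 :: c4 :: rest => simp [pvIsNone, PySem.Chars.lower]
  | [c0, c1, c2, c3] =>
    have hgoal : PySem.Chars.lower [c0, c1, c2, c3] = "none".toList ↔
        (PySem.Chars.lowerChar c0 = 'n' ∧ PySem.Chars.lowerChar c1 = 'o' ∧
         PySem.Chars.lowerChar c2 = 'n' ∧ PySem.Chars.lowerChar c3 = 'e') := by
      simp [PySem.Chars.lower]
    rw [hgoal]
    simp only [pvIsNone, Bool.and_eq_true, Bool.or_eq_true, beq_iff_eq]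
    rw [hn c0, ho c1, hn c2, he c3, and_assoc, and_assoc]

-- evaluation of A's _split_union_none when the split is exactly [head, tail]
lemma pvUnion_eval (t head tail : List Char) (hsp : pvSplitC '|' t = [head, tail]) :
    pvSplitUnionNone t =
      (if PySem.Chars.lower (PySem.Chars.strip head) = "none".toList ∨
          PySem.Chars.lower (PySem.Chars.strip tail) = "none".toList then
        (if PySem.Chars.lower (PySem.Chars.strip head) = "none".toList
         then PySem.Chars.strip tail else PySem.Chars.strip head, true)
       else (t, false)) := by
  simp only [pvSplitUnionNone, show ("|".toList : List Char) = ['|'] from rfl,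
    pvSplitOn_single, hsp, List.map_cons, List.map_nil, List.getD_cons_zero,
    List.getD_cons_succ, List.length_cons, List.length_nil]
  norm_num

lemma pvBCore_bracket (t p : List Char) (hp : p ∈ pvWrapperPrefixes)
    (hs : PySem.Chars.startswith t p = true)
    (he : PySem.Chars.endswith t "]".toList = true) :
    pvBCore t
      = pvBCore (PySem.Chars.strip (PySem.List.slice t (some ((p.length : Int))) (some (-1)))) := by
  have hpne : p ≠ [] := (pvPrefixFacts p hp).1
  have ht : t ≠ [] := by
    intro h; subst h
    rw [PySem.Chars.startswith_iff, List.prefix_nil] at hs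
    exact hpne hs
  rw [pvSliceDrop]
  conv_lhs => rw [pvBCore]
  rw [dif_neg ht]
  split
  · rename_i q hf
    rw [if_pos he, pvFindPred_eq t, pvFind?_eq t p hp hs] at hf
    obtain rfl : q = p := by injection hf with h; exact h.symm
    rfl
  · rename_i hf
    rw [if_pos he, pvFindPred_eq t, pvFind?_eq t p hp hs] at hf
    cases hf

lemma pvBCore_union (t : List Char) (h2 : (pvSplitUnionNone t).2 = true) :
    pvBCore t = pvBCore (PySem.Chars.strip (pvSplitUnionNone t).1) := by
  have ht : t ≠ [] := by
    intro h; subst h; revert h2; decide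
  conv_lhs => rw [pvBCore]
  rw [dif_neg ht]
  split
  · rename_i q hf
    exfalso
    have hew : PySem.Chars.endswith t "]".toList = true := by
      by_contra hew
      rw [if_neg hew] at hf
      cases hf
    rw [if_pos hew, pvFindPred_eq t] at hf
    have hq := List.mem_of_find?_eq_some hf
    have hsq := List.find?_some hf
    have hfacts := pvPrefixFacts q hq
    have := pvNoUnion t q hfacts.1 hfacts.2.1 hfacts.2.2.1 hfacts.2.2.2 hsq hew
    rw [this] at h2
    cases h2
  · split
    · rename_i head tail hb
      obtain ⟨hteq, hnb⟩ := pvPartitionBar_some t head tail hb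
      by_cases hbt : '|' ∈ tail
      · exfalso
        have hsp : pvSplitC '|' t = head :: pvSplitC '|' tail := by
          rw [hteq]; exact pvSplitC_app head tail hnb
        have hlen := pvSplitC_two_le tail hbt
        have hflag : (pvSplitUnionNone t).2 = false := by
          simp only [pvSplitUnionNone, show ("|".toList : List Char) = ['|'] from rfl,
            pvSplitOn_single, hsp]
          rw [if_neg (fun hc => by
            have h1 := hc.1
            simp only [List.length_map, List.length_cons] at h1
            omega)]
        rw [hflag] at h2; cases h2
      · have hsp : pvSplitC '|' t = [head, tail] := by
          rw [hteq, pvSplitC_app head tail hnb, pvSplitC_noBar tail hbt]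
        rw [if_neg (fun hh => hbt ((pvIsIn_bar tail).mp hh))]
        rw [pvUnion_eval t head tail hsp] at h2 ⊢
        by_cases hA : PySem.Chars.lower (PySem.Chars.strip head) = "none".toList
        · rw [if_pos (Or.inl hA)]
          show (if pvIsNone (PySem.Chars.strip head) = true then
              pvBCore (PySem.Chars.strip tail)
            else if pvIsNone (PySem.Chars.strip tail) = true then
              pvBCore (PySem.Chars.strip head)
            else t) = _
          rw [if_pos ((pvIsNone_iff _).mpr hA), if_pos hA]
          dsimp only
          rw [pvStrip_idem]
        · by_cases hB : PySem.Chars.lower (PySem.Chars.strip tail) = "none".toList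
          · rw [if_pos (Or.inr hB)]
            show (if pvIsNone (PySem.Chars.strip head) = true then
                pvBCore (PySem.Chars.strip tail)
              else if pvIsNone (PySem.Chars.strip tail) = true then
                pvBCore (PySem.Chars.strip head)
              else t) = _
            rw [if_neg (fun hI => hA ((pvIsNone_iff _).mp hI)),
                if_pos ((pvIsNone_iff _).mpr hB), if_neg hA]
            dsimp only
            rw [pvStrip_idem]
          · exfalso
            rw [if_neg (fun hc => hc.elim hA hB)] at h2
            cases h2
    · rename_i hbn
      exfalso
      -- no '|' in t at all, so the union flag cannot be true
      have hnt : '|' ∉ t := pvPartitionBar_none t hbn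
      have hflag : (pvSplitUnionNone t).2 = false := by
        simp only [pvSplitUnionNone, show ("|".toList : List Char) = ['|'] from rfl,
          pvSplitOn_single, pvSplitC_noBar t hnt]
        rw [if_neg (fun hc => by
          have h1 := hc.1
          simp at h1)]
      rw [hflag] at h2; cases h2

lemma pvBCore_fix (t : List Char) (ht : t ≠ [])
    (hnp : ∀ p ∈ pvWrapperPrefixes, ¬(PySem.Chars.startswith t p = true ∧
      PySem.Chars.endswith t "]".toList = true))
    (hu : (pvSplitUnionNone t).2 = false) : pvBCore t = t := by
  rw [pvBCore, dif_neg ht]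
  split
  · rename_i q hf
    exfalso
    cases hew : PySem.Chars.endswith t "]".toList with
    | false => rw [if_neg (by rw [hew]; simp)] at hf; cases hf
    | true =>
      rw [if_pos hew, pvFindPred_eq t] at hf
      exact hnp q (List.mem_of_find?_eq_some hf) ⟨List.find?_some hf, hew⟩
  · split
    · rename_i head tail hb
      obtain ⟨hteq, hnb⟩ := pvPartitionBar_some t head tail hb
      by_cases hbt : '|' ∈ tail
      · rw [if_pos ((pvIsIn_bar tail).mpr hbt)]
      · have hsp : pvSplitC '|' t = [head, tail] := by
          rw [hteq, pvSplitC_app head tail hnb, pvSplitC_noBar tail hbt]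
        rw [pvUnion_eval t head tail hsp] at hu
        have hor : ¬(PySem.Chars.lower (PySem.Chars.strip head) = "none".toList ∨
            PySem.Chars.lower (PySem.Chars.strip tail) = "none".toList) := by
          intro hc
          rw [if_pos hc] at hu
          cases hu
        rw [if_neg (fun hh => hbt ((pvIsIn_bar tail).mp hh))]
        show (if pvIsNone (PySem.Chars.strip head) = true then
            pvBCore (PySem.Chars.strip tail)
          else if pvIsNone (PySem.Chars.strip tail) = true then
            pvBCore (PySem.Chars.strip head)
          else t) = t
        rw [if_neg (fun hI => hor (Or.inl ((pvIsNone_iff _).mp hI))),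
            if_neg (fun hI => hor (Or.inr ((pvIsNone_iff _).mp hI)))]
    · rfl

lemma pvStep_mono (st : List Char × Bool) (p : List Char) (h : st.2 = true) :
    (pvPassStep st p).2 = true := by
  unfold pvPassStep
  split
  · rfl
  · exact h

lemma pvFold_mono (l : List (List Char)) (st : List Char × Bool) (h : st.2 = true) :
    (l.foldl pvPassStep st).2 = true := by
  induction l generalizing st with
  | nil => exact h
  | cons p l ih => exact ih _ (pvStep_mono st p h)

lemma pvBCore_step (st : List Char × Bool) (p : List Char) (hp : p ∈ pvWrapperPrefixes) :
    pvBCore (pvPassStep st p).1 = pvBCore st.1 := by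
  unfold pvPassStep
  split
  · rename_i hc
    rw [Bool.and_eq_true] at hc
    dsimp only
    rw [pvStripOuter_eq]
    exact (pvBCore_bracket st.1 p hp hc.1 hc.2).symm
  · rfl

lemma pvBCore_fold (l : List (List Char)) (hl : ∀ p ∈ l, p ∈ pvWrapperPrefixes)
    (st : List Char × Bool) : pvBCore (l.foldl pvPassStep st).1 = pvBCore st.1 := by
  induction l generalizing st with
  | nil => rfl
  | cons p l ih =>
    rw [List.foldl_cons]
    rw [ih (fun q hq => hl q (by simp [hq])) _]
    exact pvBCore_step st p (hl p (by simp))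

lemma pvBCore_aIter (t : List Char) : pvBCore (pvAIter t).1 = pvBCore t := by
  have e1 := pvBCore_fold pvOptionalPrefixes (by decide) (t, false)
  have e2 : pvBCore (if (pvSplitUnionNone (pvOptionalPrefixes.foldl pvPassStep (t, false)).1).2 then
        (PySem.Chars.strip (pvSplitUnionNone (pvOptionalPrefixes.foldl pvPassStep (t, false)).1).1, true)
      else pvOptionalPrefixes.foldl pvPassStep (t, false)).1
      = pvBCore (pvOptionalPrefixes.foldl pvPassStep (t, false)).1 := by
    split
    · rename_i hu
      exact (pvBCore_union _ hu).symm
    · rfl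
  have e3 := pvBCore_fold pvListPrefixes (by decide)
      (if (pvSplitUnionNone (pvOptionalPrefixes.foldl pvPassStep (t, false)).1).2 then
        (PySem.Chars.strip (pvSplitUnionNone (pvOptionalPrefixes.foldl pvPassStep (t, false)).1).1, true)
      else pvOptionalPrefixes.foldl pvPassStep (t, false))
  exact e3.trans (e2.trans e1)

lemma pvFold_false (l : List (List Char)) (st : List Char × Bool)
    (h : (l.foldl pvPassStep st).2 = false) :
    l.foldl pvPassStep st = st ∧ ∀ p ∈ l,
      ¬(PySem.Chars.startswith st.1 p = true ∧
        PySem.Chars.endswith st.1 "]".toList = true) := by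
  induction l with
  | nil => exact ⟨rfl, by simp⟩
  | cons p l ih =>
    rw [List.foldl_cons] at h ⊢
    have hnc : ¬(PySem.Chars.startswith st.1 p = true ∧
        PySem.Chars.endswith st.1 "]".toList = true) := by
      intro hcond
      have hc : (PySem.Chars.startswith st.1 p && PySem.Chars.endswith st.1 "]".toList) = true := by
        rw [Bool.and_eq_true]; exact hcond
      have h1 : (pvPassStep st p).2 = true := by unfold pvPassStep; rw [if_pos hc]
      exact absurd (pvFold_mono l _ h1) (by simp [h])
    have hstep : pvPassStep st p = st := by
      unfold pvPassStep
      rw [if_neg (by rw [Bool.and_eq_true]; exact hnc)]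
    rw [hstep] at h ⊢
    obtain ⟨hfix, hall⟩ := ih h
    exact ⟨hfix, fun q hq => (List.mem_cons.mp hq).elim (fun he => he ▸ hnc) (hall q)⟩

set_option maxHeartbeats 1000000 in
lemma pvAIter_false (t : List Char) (ht : t ≠ []) (h : (pvAIter t).2 = false) :
    (pvAIter t).1 = t ∧ pvBCore t = t := by
  have h' : (pvListPrefixes.foldl pvPassStep
      (if (pvSplitUnionNone (pvOptionalPrefixes.foldl pvPassStep (t, false)).1).2 then
        (PySem.Chars.strip (pvSplitUnionNone (pvOptionalPrefixes.foldl pvPassStep (t, false)).1).1, true)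
      else pvOptionalPrefixes.foldl pvPassStep (t, false))).2 = false := h
  set s1 := pvOptionalPrefixes.foldl pvPassStep (t, false) with hs1
  set s2 := (if (pvSplitUnionNone s1.1).2 then
      (PySem.Chars.strip (pvSplitUnionNone s1.1).1, true) else s1) with hs2
  obtain ⟨hfix3, hall3⟩ := pvFold_false pvListPrefixes s2 h'
  have hs2f : s2.2 = false := by rw [← hfix3]; exact h'
  have hu2 : (pvSplitUnionNone s1.1).2 = false := by
    by_contra hu
    rw [hs2, if_pos (by simpa using hu)] at hs2f
    cases hs2f
  have hs2eq : s2 = s1 := by rw [hs2, if_neg (by simp [hu2])]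
  have hs1f : s1.2 = false := hs2eq ▸ hs2f
  obtain ⟨hfix1, hall1⟩ := pvFold_false pvOptionalPrefixes (t, false) hs1f
  have hs1eq : s1 = (t, false) := hfix1
  have hres : (pvAIter t).1 = t := by
    have hiter : pvAIter t = pvListPrefixes.foldl pvPassStep s2 := rfl
    rw [hiter, hfix3, hs2eq, hs1eq]
  refine ⟨hres, pvBCore_fix t ht ?_ ?_⟩
  · intro p hp
    have happ : pvWrapperPrefixes = pvOptionalPrefixes ++ pvListPrefixes := rfl
    rw [happ] at hp
    rcases List.mem_append.mp hp with hp' | hp'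
    · exact hall1 p hp'
    · have := hall3 p hp'
      rw [hs2eq, hs1eq] at this
      exact this
  · have := hu2
    rw [hs1eq] at this
    exact this

lemma pvMain (t : List Char) : pvALoop t = pvBCore t := by
  induction hn : t.length using Nat.strong_induction_on generalizing t with
  | _ n ih =>
    subst hn
    rw [pvALoop]
    split
    · rename_i h0; rw [h0, pvBCore_nil]
    · rename_i h0
      split
      · rename_i hc
        rw [ih (pvAIter t).1.length (pvAIter_dec t hc) (pvAIter t).1 rfl]
        exact pvBCore_aIter t
      · rename_i hc
        have hres := pvAIter_false t h0 (by simpa using hc)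
        rw [hres.1, hres.2]

-- ===== VERDICT (by name: the statement is the Claim_ definition above) =====
theorem unwrap_wrappers_py_spec : Claim_equal_unwrap_wrappers_py := by
  intro text _
  unfold Spec_unwrap_wrappers_py unwrap_wrappers_py unwrap_wrappers_py_alt
  rw [pvMain]
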